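-- pv_equiv track=rewrite | github.com/sproutsai-engg/coding_question_generator | json_files/python_codes/Q_1024.py | count_and_triples
-- ===== SOURCE A (Python) =====
-- def count_and_triples(nums):
--     count = 0
--     for i in range(len(nums)):
--         for j in range(i + 1, len(nums)):
--             for k in range(j + 1, len(nums)):
--                 if nums[i] & nums[j] & nums[k] != 0:
--                     count += 1
--     return count
-- ===== SOURCE B (Python) =====
-- def count_and_triples(nums):
--     count = 0
--     pairs = []  # bitwise ANDs a_i & a_j of every pair i < j already processed
--     seen = []   # the prefix processed so far
--     for x in nums:
--         count += len([1 for p in pairs if p & x])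
--         pairs = pairs + [y & x for y in seen]
--         seen = seen + [x]
--     return count
-- ===== Notes on version B (the rewrite author's own statement) =====
-- stated objective: alternative
-- what changed: Replaces the triple nested index loops with a single left-to-right pass that maintains the list of bitwise ANDs of all pairs seen so far and, for each new element, counts the stored pair-ANDs whose AND with it is nonzero.
import Mathlib
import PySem

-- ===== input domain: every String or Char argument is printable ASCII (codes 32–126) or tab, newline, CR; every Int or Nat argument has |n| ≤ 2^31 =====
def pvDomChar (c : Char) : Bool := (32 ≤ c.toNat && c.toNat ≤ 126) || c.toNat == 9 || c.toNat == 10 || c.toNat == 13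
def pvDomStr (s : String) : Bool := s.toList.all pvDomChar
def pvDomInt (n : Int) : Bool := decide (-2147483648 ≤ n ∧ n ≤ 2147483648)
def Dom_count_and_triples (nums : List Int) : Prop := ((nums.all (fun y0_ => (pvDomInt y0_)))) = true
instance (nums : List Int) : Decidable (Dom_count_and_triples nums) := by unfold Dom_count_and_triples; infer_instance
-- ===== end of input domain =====

-- B replaces A's triple nested index loops by a single left-to-right pass that maintains the
-- bitwise ANDs of all pairs seen so far (an alternative single-pass algorithm of the same asymptotic cost).

-- ===== PORT A =====
def count_and_triples (nums : List Int) : Int :=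
  (PySem.List.pyRange 0 (nums.length : Int) 1).foldl (fun count i =>
    (PySem.List.pyRange (i + 1) (nums.length : Int) 1).foldl (fun count j =>
      (PySem.List.pyRange (j + 1) (nums.length : Int) 1).foldl (fun count k =>
        if PySem.Int.band (PySem.Int.band (PySem.List.pyGetD nums i 0)
              (PySem.List.pyGetD nums j 0)) (PySem.List.pyGetD nums k 0) ≠ 0
        then count + 1 else count) count) count) 0

-- ===== PORT B =====
def count_and_triples_alt (nums : List Int) : Int :=
  (nums.foldl
    (fun st x =>
      (st.1 + ((st.2.1.filter (fun p => PySem.Int.band p x != 0)).length : Int),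
       st.2.1 ++ st.2.2.map (fun y => PySem.Int.band y x),
       st.2.2 ++ [x]))
    ((0 : Int), ([] : List Int), ([] : List Int))).1

-- ===== PRECONDITION & SPEC =====
def Spec_count_and_triples (nums : List Int) (out : Int) : Prop := out = count_and_triples_alt nums
instance (nums : List Int) (out : Int) : Decidable (Spec_count_and_triples nums out) := by unfold Spec_count_and_triples; infer_instance

-- ===== CLAIM (what is proved, stated in full; the proofs are below) =====
def Claim_equal_count_and_triples : Prop := ∀ (nums : List Int), Dom_count_and_triples nums → Spec_count_and_triples nums (count_and_triples nums)

-- ===== LEMMAS AND PROOFS =====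

-- Spec-side counting functions (triples / pairs / singles with nonzero AND), head recursion.
def scnt (p : Int) : List Int → Int
  | [] => 0
  | z :: l => (if PySem.Int.band p z ≠ 0 then 1 else 0) + scnt p l

def pcnt (x : Int) : List Int → Int
  | [] => 0
  | y :: l => scnt (PySem.Int.band x y) l + pcnt x l

def tcnt : List Int → Int
  | [] => 0
  | x :: l => pcnt x l + tcnt l

-- All pairwise ANDs of a list (first operand earlier in the list).
def apairs : List Int → List Int
  | [] => []
  | x :: l => l.map (fun y => PySem.Int.band x y) ++ apairs l

-- Number of elements of ps whose AND with x is nonzero (B's per-step count).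
def sx (ps : List Int) (x : Int) : Int :=
  ((ps.filter (fun p => PySem.Int.band p x != 0)).length : Int)

lemma sx_nil (x : Int) : sx [] x = 0 := rfl

lemma sx_cons (p : Int) (l : List Int) (x : Int) :
    sx (p :: l) x = (if PySem.Int.band p x ≠ 0 then 1 else 0) + sx l x := by
  by_cases h : PySem.Int.band p x = 0
  · simp [sx, h]
  · simp [sx, h]
    ring

lemma sx_append (a b : List Int) (x : Int) : sx (a ++ b) x = sx a x + sx b x := by
  simp [sx, List.filter_append]

lemma scnt_append_singleton (p : Int) (l : List Int) (x : Int) :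
    scnt p (l ++ [x]) = scnt p l + (if PySem.Int.band p x ≠ 0 then 1 else 0) := by
  induction l with
  | nil => simp [scnt]
  | cons z l ih => simp [scnt, ih]; ring

lemma pcnt_append_singleton (y : Int) (l : List Int) (x : Int) :
    pcnt y (l ++ [x]) = pcnt y l + sx (l.map (fun z => PySem.Int.band y z)) x := by
  induction l with
  | nil => simp [pcnt, scnt, sx]
  | cons z l ih =>
      simp only [List.cons_append, pcnt, ih, List.map_cons, sx_cons,
        scnt_append_singleton]
      ring

lemma tcnt_append_singleton (l : List Int) (x : Int) :
    tcnt (l ++ [x]) = tcnt l + sx (apairs l) x := by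
  induction l with
  | nil => simp [tcnt, pcnt, apairs, sx]
  | cons y l ih =>
      simp only [List.cons_append, tcnt, ih, apairs, sx_append,
        pcnt_append_singleton]
      ring

lemma sx_apairs_append (l : List Int) (x z : Int) :
    sx (apairs (l ++ [x])) z
      = sx (apairs l) z + sx (l.map (fun y => PySem.Int.band y x)) z := by
  induction l with
  | nil => simp [apairs, sx]
  | cons y l ih =>
      simp only [List.cons_append, apairs, List.map_cons, List.map_append,
        List.map_nil, sx_append, sx_cons, sx_nil, ih]
      ring

-- B's fold invariant: the running count equals tcnt of the processed prefix, the seen list is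
-- the prefix, and the pair list counts like the prefix's pairwise ANDs.
lemma bfold_inv :
    ∀ (rest t : List Int) (c : Int) (ps sn : List Int),
      c = tcnt t → sn = t → (∀ z, sx ps z = sx (apairs t) z) →
      (rest.foldl
        (fun st x =>
          (st.1 + ((st.2.1.filter (fun p => PySem.Int.band p x != 0)).length : Int),
           st.2.1 ++ st.2.2.map (fun y => PySem.Int.band y x),
           st.2.2 ++ [x]))
        (c, ps, sn)).1 = tcnt (t ++ rest) := by
  intro rest
  induction rest with
  | nil => intro t c ps sn hc hs hp; simpa using hc
  | cons x rest ih =>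
      intro t c ps sn hc hs hp
      simp only [List.foldl_cons]
      have h1 : c + ((ps.filter (fun p => PySem.Int.band p x != 0)).length : Int)
          = tcnt (t ++ [x]) := by
        rw [tcnt_append_singleton, hc]
        have hps : ((ps.filter (fun p => PySem.Int.band p x != 0)).length : Int) = sx ps x := rfl
        rw [hps, hp x]
      have h2 : ∀ z, sx (ps ++ sn.map (fun y => PySem.Int.band y x)) z
          = sx (apairs (t ++ [x])) z := by
        intro z
        rw [sx_append, hp z, hs, sx_apairs_append]
      have h3 : t ++ (x :: rest) = (t ++ [x]) ++ rest := by simp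
      rw [h3]
      exact ih (t ++ [x]) _ _ _ h1 (by rw [hs]) h2

lemma alt_eq_tcnt (nums : List Int) : count_and_triples_alt nums = tcnt nums := by
  unfold count_and_triples_alt
  have := bfold_inv nums [] 0 [] [] rfl rfl (fun z => rfl)
  simpa using this

-- A-side: turning the three index loops into the structural counters.
lemma foldl_scnt (p : Int) : ∀ (l : List Int) (c : Int),
    l.foldl (fun acc z => if PySem.Int.band p z ≠ 0 then acc + 1 else acc) c
      = c + scnt p l := by
  intro l
  induction l with
  | nil => intro c; simp [scnt]
  | cons z l ih =>
      intro c
      simp only [List.foldl_cons, scnt]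
      by_cases h : PySem.Int.band p z = 0
      · rw [if_neg (not_not_intro h), if_neg (not_not_intro h), ih]; ring
      · rw [if_pos h, if_pos h, ih]; ring

lemma inner_loop (nums : List Int) (p : Int) {j : Int} (hj : 0 ≤ j) (c : Int) :
    (PySem.List.pyRange j (nums.length : Int) 1).foldl
        (fun count k =>
          if PySem.Int.band p (PySem.List.pyGetD nums k 0) ≠ 0 then count + 1 else count) c
      = c + scnt p (nums.drop j.toNat) := by
  rw [show (PySem.List.pyRange j (nums.length : Int) 1)
        = (PySem.List.pyRange j (nums.length : Int)) from rfl]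
  rw [PySem.List.foldl_pyRange_pyGetD' nums 0
        (fun acc z => if PySem.Int.band p z ≠ 0 then acc + 1 else acc) c hj]
  exact foldl_scnt p _ c

lemma middle_loop (nums : List Int) (x : Int) :
    ∀ (d : List Int) (j : Int) (c : Int), 0 ≤ j → nums.drop j.toNat = d →
    (PySem.List.pyRange j (nums.length : Int) 1).foldl
        (fun count j' =>
          (PySem.List.pyRange (j' + 1) (nums.length : Int) 1).foldl
            (fun count k =>
              if PySem.Int.band (PySem.Int.band x (PySem.List.pyGetD nums j' 0))
                   (PySem.List.pyGetD nums k 0) ≠ 0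
              then count + 1 else count) count) c
      = c + pcnt x d := by
  intro d
  induction d with
  | nil =>
      intro j c hj hd
      have hlen : nums.length ≤ j.toNat := List.drop_eq_nil_iff.mp hd
      have : (nums.length : Int) ≤ j := by omega
      rw [PySem.List.pyRange_one_eq_nil this]
      simp [pcnt]
  | cons y d ih =>
      intro j c hj hd
      have hjl : j.toNat < nums.length := by
        by_contra h
        push Not at h
        rw [List.drop_eq_nil_iff.mpr h] at hd
        simp at hd
      have hjn : j < (nums.length : Int) := by omega
      obtain ⟨hy, hdrop⟩ := List.cons_eq_cons.mp ((List.getElem_cons_drop hjl).trans hd)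
      have hgd : PySem.List.pyGetD nums j 0 = y := by
        rw [PySem.List.pyGetD_of_nonneg nums 0 hj, List.getD_eq_getElem?_getD]
        simp [List.getElem?_eq_getElem hjl, hy]
      have ht : (j + 1).toNat = j.toNat + 1 := by omega
      rw [PySem.List.pyRange_one_cons hjn, List.foldl_cons, hgd,
          inner_loop nums (PySem.Int.band x y) (by omega) c,
          ih (j + 1) _ (by omega) (by rw [ht]; exact hdrop), ht, hdrop]
      simp [pcnt]
      ring

lemma outer_loop (nums : List Int) :
    ∀ (d : List Int) (i : Int) (c : Int), 0 ≤ i → nums.drop i.toNat = d →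
    (PySem.List.pyRange i (nums.length : Int) 1).foldl
        (fun count i' =>
          (PySem.List.pyRange (i' + 1) (nums.length : Int) 1).foldl
            (fun count j =>
              (PySem.List.pyRange (j + 1) (nums.length : Int) 1).foldl
                (fun count k =>
                  if PySem.Int.band (PySem.Int.band (PySem.List.pyGetD nums i' 0)
                        (PySem.List.pyGetD nums j 0)) (PySem.List.pyGetD nums k 0) ≠ 0
                  then count + 1 else count) count) count) c
      = c + tcnt d := by
  intro d
  induction d with
  | nil =>
      intro i c hi hd
      have hlen : nums.length ≤ i.toNat := List.drop_eq_nil_iff.mp hd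
      have : (nums.length : Int) ≤ i := by omega
      rw [PySem.List.pyRange_one_eq_nil this]
      simp [tcnt]
  | cons y d ih =>
      intro i c hi hd
      have hil : i.toNat < nums.length := by
        by_contra h
        push Not at h
        rw [List.drop_eq_nil_iff.mpr h] at hd
        simp at hd
      have hin : i < (nums.length : Int) := by omega
      obtain ⟨hy, hdrop⟩ := List.cons_eq_cons.mp ((List.getElem_cons_drop hil).trans hd)
      have hgd : PySem.List.pyGetD nums i 0 = y := by
        rw [PySem.List.pyGetD_of_nonneg nums 0 hi, List.getD_eq_getElem?_getD]
        simp [List.getElem?_eq_getElem hil, hy]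
      have ht : (i + 1).toNat = i.toNat + 1 := by omega
      rw [PySem.List.pyRange_one_cons hin, List.foldl_cons, hgd,
          middle_loop nums y d (i + 1) c (by omega) (by rw [ht]; exact hdrop),
          ih (i + 1) _ (by omega) (by rw [ht]; exact hdrop)]
      simp [tcnt]
      ring

lemma a_eq_tcnt (nums : List Int) : count_and_triples nums = tcnt nums := by
  unfold count_and_triples
  simpa using outer_loop nums nums 0 0 (by omega) (by simp)

-- ===== VERDICT (by name: the statement is the Claim_ definition above) =====
theorem count_and_triples_spec : Claim_equal_count_and_triples := by
  intro nums _
  unfold Spec_count_and_triples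
  rw [a_eq_tcnt, alt_eq_tcnt]
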